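-- pv_equiv track=rewrite | github.com/JonasRSV/ChristmasGame | santa.py | evaluate_sort
-- ===== SOURCE A (Python) =====
-- def evaluate_sort(giftorder: list) -> float:
--     """ Max Delta """
--     max_delta = 0
--     observation = {}
--     for index, gift in enumerate(giftorder):
--         if gift not in observation:
--             observation[gift] = 0
--
--         max_delta = max(max_delta, index - observation[gift] - 1)
--         observation[gift] = index
--
--     for obs in observation.values():
--         max_delta = max(max_delta, len(giftorder) - obs - 1)
--
--     return max_delta
-- ===== SOURCE B (Python) =====
-- def evaluate_sort(giftorder: list) -> float:
--     """ Max Delta """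
--     positions = {}
--     for i, g in enumerate(giftorder):
--         positions.setdefault(g, []).append(i)
--     n = len(giftorder)
--     best = 0
--     for idxs in positions.values():
--         best = max(best, idxs[0] - 1)
--         for a, b in zip(idxs, idxs[1:]):
--             best = max(best, b - a - 1)
--         best = max(best, n - idxs[-1] - 1)
--     return best
-- ===== Notes on version B (the rewrite author's own statement) =====
-- stated objective: alternative
-- what changed: Instead of one rolling last-seen-index dict interleaved with max updates, B first groups each gift's occurrence indices into a dict of lists, then computes all gaps (sentinel first-1, consecutive deltas, tail n-last-1) per gift in a second phase.
import Mathlib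
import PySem

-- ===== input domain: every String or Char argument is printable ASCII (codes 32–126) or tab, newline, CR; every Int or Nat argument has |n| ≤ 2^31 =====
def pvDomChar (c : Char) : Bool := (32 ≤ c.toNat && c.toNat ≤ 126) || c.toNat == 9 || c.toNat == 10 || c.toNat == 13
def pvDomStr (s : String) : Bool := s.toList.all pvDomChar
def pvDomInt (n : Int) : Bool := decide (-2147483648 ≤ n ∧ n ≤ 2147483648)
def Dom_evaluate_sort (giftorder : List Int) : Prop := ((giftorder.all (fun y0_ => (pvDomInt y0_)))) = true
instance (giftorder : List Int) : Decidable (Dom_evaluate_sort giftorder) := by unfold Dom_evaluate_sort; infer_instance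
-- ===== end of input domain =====

-- B groups each gift's occurrence indices first, then computes all gaps per gift in a second phase
-- (alternative decomposition; same O(n) cost, return value proved identical).

-- ===== PORT A =====
def evaluate_sort (giftorder : List Int) : Int :=
  let s := (PySem.List.enumerate giftorder).foldl
    (fun (st : Int × PySem.Dict Int Int) p =>
      let obs := if st.2.contains p.2 then st.2 else st.2.insert p.2 0
      (max st.1 (p.1 - obs.getD p.2 0 - 1), obs.insert p.2 p.1))
    (0, PySem.Dict.empty)
  s.2.values.foldl (fun m v => max m (PySem.List.len giftorder - v - 1)) s.1

-- ===== PORT B =====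
def evaluate_sort_alt (giftorder : List Int) : Int :=
  let positions := (PySem.List.enumerate giftorder).foldl
    (fun (d : PySem.Dict Int (List Int)) p => d.modify p.2 [] (· ++ [p.1]))
    PySem.Dict.empty
  let n := PySem.List.len giftorder
  positions.values.foldl (fun best idxs =>
    let b1 := max best (PySem.List.pyGetD idxs 0 0 - 1)
    let b2 := (idxs.zip (PySem.List.slice idxs (some 1) none)).foldl
      (fun m q => max m (q.2 - q.1 - 1)) b1
    max b2 (n - PySem.List.pyGetD idxs (-1) 0 - 1)) 0

-- ===== PRECONDITION & SPEC =====
def Spec_evaluate_sort (giftorder : List Int) (out : Int) : Prop := out = evaluate_sort_alt giftorder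
instance (giftorder : List Int) (out : Int) : Decidable (Spec_evaluate_sort giftorder out) := by unfold Spec_evaluate_sort; infer_instance

-- ===== CLAIM (what is proved, stated in full; the proofs are below) =====
def Claim_equal_evaluate_sort : Prop := ∀ (giftorder : List Int), Dom_evaluate_sort giftorder → Spec_evaluate_sort giftorder (evaluate_sort giftorder)

-- ===== LEMMAS AND PROOFS =====

-- last element of a gift's (nonempty) index list
def pvLastD (l : List Int) : Int := l.getLastD 0

-- the "inner" gap accumulator of one gift: sentinel gap (first - 1) then consecutive deltas
def pvInner (m : Int) (l : List Int) : Int :=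
  (l.zip l.tail).foldl (fun m q => max m (q.2 - q.1 - 1)) (max m (PySem.List.pyGetD l 0 0 - 1))

-- coupling invariant between A's loop state (m, dA) and B's grouping dict dB
def pvInv (m : Int) (dA : PySem.Dict Int Int) (dB : PySem.Dict Int (List Int)) : Prop :=
  dA.items = dB.items.map (fun p => (p.1, pvLastD p.2)) ∧
  (∀ p ∈ dB.items, p.2 ≠ []) ∧
  dB.keys.Nodup ∧
  m = dB.items.foldl (fun m p => pvInner m p.2) 0

lemma pv_foldl_pull {α : Type} (f : Int → α → Int)
    (hf : ∀ a b x, f (max a b) x = max (f a x) b) :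
    ∀ (l : List α) (a b : Int), l.foldl f (max a b) = max (l.foldl f a) b := by
  intro l
  induction l with
  | nil => intro a b; rfl
  | cons x xs ih =>
    intro a b
    simp only [List.foldl_cons, hf a b x, ih (f a x) b]

lemma pv_max_pull {α : Type} (g : α → Int) (a b : Int) (x : α) :
    max (max a b) (g x) = max (max a (g x)) b := by
  rw [max_right_comm]

lemma pvInner_pull (l : List Int) (a b : Int) :
    pvInner (max a b) l = max (pvInner a l) b := by
  unfold pvInner
  rw [pv_max_pull (fun l : List Int => PySem.List.pyGetD l 0 0 - 1) a b l]
  exact pv_foldl_pull _ (pv_max_pull (fun q : Int × Int => q.2 - q.1 - 1)) _ _ _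

lemma pv_zip_tail_append (l : List Int) (i : Int) (h : l ≠ []) :
    (l ++ [i]).zip (l ++ [i]).tail = l.zip l.tail ++ [(pvLastD l, i)] := by
  induction l with
  | nil => exact absurd rfl h
  | cons x xs ih =>
    cases xs with
    | nil => simp [pvLastD]
    | cons y ys =>
      have := ih (by simp)
      simp only [List.cons_append, List.tail_cons, List.zip_cons_cons] at this ⊢
      rw [this]
      simp [pvLastD]

lemma pvInner_append (m : Int) (l : List Int) (i : Int) (h : l ≠ []) :
    pvInner m (l ++ [i]) = max (pvInner m l) (i - pvLastD l - 1) := by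
  unfold pvInner
  rw [pv_zip_tail_append l i h, List.foldl_append]
  obtain ⟨x, xs, rfl⟩ := List.exists_cons_of_ne_nil h
  rw [List.cons_append, PySem.List.pyGetD_zero_cons, PySem.List.pyGetD_zero_cons]
  rfl

lemma pv_fold_inner_map (g : Int) (l : List Int) (hl : l ≠ []) (i : Int) :
    ∀ (items : List (Int × List Int)) (a : Int),
      (items.map (·.1)).Nodup → (g, l) ∈ items →
      (items.map (fun p => if (p.1 == g) = true then (g, l ++ [i]) else p)).foldl
          (fun m p => pvInner m p.2) a
        = max (items.foldl (fun m p => pvInner m p.2) a) (i - pvLastD l - 1) := by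
  intro items
  induction items with
  | nil => intro a _ hm; exact absurd hm (by simp)
  | cons p rest ih =>
    intro a hnd hm
    simp only [List.map_cons, List.nodup_cons] at hnd
    by_cases hp : p.1 = g
    · have hpl : p = (g, l) := by
        rcases List.mem_cons.mp hm with h | h
        · exact h.symm
        · exact absurd (List.mem_map.mpr ⟨(g, l), h, rfl⟩) (hp ▸ hnd.1)
      subst hpl
      rw [List.map_cons, List.foldl_cons, List.foldl_cons]
      have hrest : rest.map (fun p => if (p.1 == g) = true then (g, l ++ [i]) else p) = rest := by
        apply List.map_congr_left ?_ |>.trans (List.map_id rest)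
        intro q hq
        have : q.1 ≠ g := fun hqg => hnd.1 (List.mem_map.mpr ⟨q, hq, hqg⟩)
        simp [this]
      have hhead : (if ((((g, l) : Int × List Int).1 == g) = true) then (g, l ++ [i]) else (g, l)) = (g, l ++ [i]) := by simp
      rw [hhead, hrest]
      show List.foldl (fun m p => pvInner m p.2) (pvInner a (l ++ [i])) rest = _
      rw [pvInner_append a l i hl]
      exact pv_foldl_pull _ (fun a b x => pvInner_pull x.2 a b) rest _ _
    · have hm' : (g, l) ∈ rest := by
        rcases List.mem_cons.mp hm with h | h
        · exact absurd (congrArg Prod.fst h.symm) hp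
        · exact h
      rw [List.map_cons, List.foldl_cons, List.foldl_cons]
      have hhead : (if ((p.1 == g) = true) then (g, l ++ [i]) else p) = p := by simp [hp]
      rw [hhead]
      exact ih _ hnd.2 hm'

lemma pv_getLast_eq (l : List Int) (h : l ≠ []) : l.getLast h = pvLastD l := by
  unfold pvLastD
  rw [List.getLastD_eq_getLast?, List.getLast?_eq_some_getLast h]
  rfl

lemma pv_keys_eq (dA : PySem.Dict Int Int) (dB : PySem.Dict Int (List Int))
    (h : dA.items = dB.items.map (fun p => (p.1, pvLastD p.2))) : dA.keys = dB.keys := by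
  simp only [PySem.Dict.keys, h, List.map_map]
  rfl

lemma pv_contains_eq (dA : PySem.Dict Int Int) (dB : PySem.Dict Int (List Int))
    (h : dA.items = dB.items.map (fun p => (p.1, pvLastD p.2))) (g : Int) :
    dA.contains g = dB.contains g := by
  rw [PySem.Dict.contains_eq_decide_mem_keys, PySem.Dict.contains_eq_decide_mem_keys,
    pv_keys_eq dA dB h]

-- one step of both loops preserves the invariant
lemma pv_step (m : Int) (dA : PySem.Dict Int Int) (dB : PySem.Dict Int (List Int))
    (h : pvInv m dA dB) (i g : Int) :
    pvInv (max m (i - (if dA.contains g then dA else dA.insert g 0).getD g 0 - 1))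
      ((if dA.contains g then dA else dA.insert g 0).insert g i)
      (dB.modify g [] (· ++ [i])) := by
  obtain ⟨h1, h2, h3, h4⟩ := h
  have hkeysnd : (dB.items.map (fun p => p.1)).Nodup := h3
  by_cases hc : dB.contains g = true
  · -- g already seen: both dicts rewrite their g entry in place
    have hcA : dA.contains g = true := (pv_contains_eq dA dB h1 g).trans hc
    -- the existing index list of g
    have hg : g ∈ dB.keys := by
      have := PySem.Dict.contains_eq_decide_mem_keys dB g
      rw [hc] at this; simpa using this.symm
    obtain ⟨p, hp, hpg⟩ := List.mem_map.mp hg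
    obtain ⟨l, rfl⟩ : ∃ l, p = (g, l) := ⟨p.2, by rw [← hpg]⟩
    have hl : l ≠ [] := h2 (g, l) hp
    have hgetB : dB.getD g [] = l := PySem.Dict.getD_of_mem_items dB hp h3 []
    have hgetA : dA.getD g 0 = pvLastD l := by
      refine PySem.Dict.getD_of_mem_items dA ?_ ?_ 0
      · rw [h1]; exact List.mem_map.mpr ⟨(g, l), hp, rfl⟩
      · rw [pv_keys_eq dA dB h1]; exact h3
    have hBitems : (dB.modify g [] (· ++ [i])).items
        = dB.items.map (fun p => if (p.1 == g) = true then (g, l ++ [i]) else p) := by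
      show (dB.insert g (dB.getD g [] ++ [i])).items = _
      rw [hgetB, PySem.Dict.items_insert_of_contains dB _ hc]
    have hAitems : ((if dA.contains g then dA else dA.insert g 0).insert g i).items
        = dA.items.map (fun p => if (p.1 == g) = true then (g, i) else p) := by
      rw [if_pos hcA]
      exact PySem.Dict.items_insert_of_contains dA i hcA
    refine ⟨?_, ?_, ?_, ?_⟩
    · rw [hAitems, hBitems, h1, List.map_map, List.map_map]
      refine List.map_congr_left ?_
      intro q hq
      by_cases hq1 : q.1 = g <;> simp [hq1, pvLastD]
    · rw [hBitems]
      intro q hq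
      obtain ⟨r, _, rfl⟩ := List.mem_map.mp hq
      by_cases hr : r.1 = g
      · simp [hr]
      · simpa [hr] using h2 r (by assumption)
    · show ((dB.modify g [] (· ++ [i])).items.map (fun x => x.1)).Nodup
      rw [hBitems, List.map_map]
      have : ((fun x : Int × List Int => x.1) ∘
          (fun p => if (p.1 == g) = true then (g, l ++ [i]) else p)) = (fun x => x.1) := by
        funext q; by_cases hq1 : q.1 = g <;> simp [hq1]
      rw [this]; exact hkeysnd
    · rw [if_pos hcA, hgetA, hBitems, h4]
      exact (pv_fold_inner_map g l hl i dB.items 0 hkeysnd hp).symm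
  · -- g is new: both dicts append a fresh entry
    have hc' : dB.contains g = false := by simpa using hc
    have hcA : dA.contains g = false := (pv_contains_eq dA dB h1 g).trans hc'
    have hgk : g ∉ dB.items.map (fun p => p.1) := by
      have := PySem.Dict.contains_eq_decide_mem_keys dB g
      rw [hc'] at this
      simpa [PySem.Dict.keys] using this.symm
    have hobs : (if dA.contains g then dA else dA.insert g 0) = dA.insert g 0 := if_neg (by simp [hcA])
    have hobsItems : (dA.insert g 0).items = dA.items ++ [(g, 0)] :=
      PySem.Dict.items_insert_of_not_contains dA 0 hcA
    have hAnotg : ∀ p ∈ dA.items, p.1 ≠ g := by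
      intro p hp hpg
      rw [h1] at hp
      obtain ⟨q, hq, hq2⟩ := List.mem_map.mp hp
      exact hgk (List.mem_map.mpr ⟨q, hq, by rw [show q.1 = p.1 from congrArg Prod.fst hq2, hpg]⟩)
    have hAitems : ((dA.insert g 0).insert g i).items = dA.items ++ [(g, i)] := by
      rw [PySem.Dict.items_insert_of_contains _ i (PySem.Dict.contains_insert_self dA g 0), hobsItems]
      rw [List.map_append]
      congr 1
      · refine (List.map_congr_left ?_).trans (List.map_id dA.items)
        intro q hq; simp [hAnotg q hq]
      · simp
    have hBitems : (dB.modify g [] (· ++ [i])).items = dB.items ++ [(g, [i])] := by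
      show (dB.insert g (dB.getD g [] ++ [i])).items = _
      rw [PySem.Dict.getD_of_not_contains dB [] hc', PySem.Dict.items_insert_of_not_contains dB _ hc']
      rfl
    refine ⟨?_, ?_, ?_, ?_⟩
    · rw [hobs, hAitems, hBitems, h1, List.map_append]
      rfl
    · rw [hBitems]
      intro q hq
      rcases List.mem_append.mp hq with hq | hq
      · exact h2 q hq
      · simp at hq; simp [hq]
    · show ((dB.modify g [] (· ++ [i])).items.map (fun x => x.1)).Nodup
      rw [hBitems, List.map_append, List.nodup_append]
      refine ⟨hkeysnd, List.nodup_singleton g, ?_⟩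
      intro a ha b hb
      simp only [List.map_cons, List.map_nil, List.mem_singleton] at hb
      subst hb
      exact fun hag => hgk (hag ▸ ha)
    · rw [hobs, PySem.Dict.getD_insert_self, hBitems, List.foldl_append, h4]
      show _ = pvInner (dB.items.foldl (fun m p => pvInner m p.2) 0) [i]
      unfold pvInner
      rw [PySem.List.pyGetD_zero_cons]
      simp

lemma pv_loop (ps : List (Int × Int)) :
    ∀ (m : Int) (dA : PySem.Dict Int Int) (dB : PySem.Dict Int (List Int)),
      pvInv m dA dB →
      pvInv (ps.foldl (fun (st : Int × PySem.Dict Int Int) p =>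
              let obs := if st.2.contains p.2 then st.2 else st.2.insert p.2 0
              (max st.1 (p.1 - obs.getD p.2 0 - 1), obs.insert p.2 p.1)) (m, dA)).1
            (ps.foldl (fun (st : Int × PySem.Dict Int Int) p =>
              let obs := if st.2.contains p.2 then st.2 else st.2.insert p.2 0
              (max st.1 (p.1 - obs.getD p.2 0 - 1), obs.insert p.2 p.1)) (m, dA)).2
            (ps.foldl (fun d p => d.modify p.2 [] (· ++ [p.1])) dB) := by
  induction ps with
  | nil => intro m dA dB h; exact h
  | cons p ps ih =>
    intro m dA dB h
    exact ih _ _ _ (pv_step m dA dB h p.1 p.2)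

-- second phases: interchange of the per-gift inner fold and the tail-gap fold
lemma pv_interchange (n : Int) :
    ∀ (items : List (Int × List Int)) (a : Int),
      items.foldl (fun m p => max (pvInner m p.2) (n - pvLastD p.2 - 1)) a
        = items.foldl (fun m p => max m (n - pvLastD p.2 - 1))
            (items.foldl (fun m p => pvInner m p.2) a) := by
  intro items
  induction items with
  | nil => intro a; rfl
  | cons p ps ih =>
    intro a
    have hS : ∀ (a b : Int) (q : Int × List Int),
        max (pvInner (max a b) q.2) (n - pvLastD q.2 - 1)
          = max (max (pvInner a q.2) (n - pvLastD q.2 - 1)) b := by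
      intro a b q
      rw [pvInner_pull, max_right_comm]
    simp only [List.foldl_cons]
    rw [pv_foldl_pull _ hS ps (pvInner a p.2) (n - pvLastD p.2 - 1),
      ih (pvInner a p.2),
      pv_foldl_pull (fun m q => max m (n - pvLastD q.2 - 1))
        (pv_max_pull (fun q : Int × List Int => n - pvLastD q.2 - 1)) ps
        (ps.foldl (fun m p => pvInner m p.2) (pvInner a p.2)) (n - pvLastD p.2 - 1)]

-- ===== VERDICT (by name: the statement is the Claim_ definition above) =====
theorem evaluate_sort_spec : Claim_equal_evaluate_sort := by
  intro giftorder _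
  unfold Spec_evaluate_sort evaluate_sort evaluate_sort_alt
  have h0 : pvInv 0 PySem.Dict.empty PySem.Dict.empty := by
    refine ⟨rfl, ?_, List.nodup_nil, rfl⟩
    intro p hp
    cases hp
  have hinv := pv_loop (PySem.List.enumerate giftorder) 0 PySem.Dict.empty PySem.Dict.empty h0
  set s := (PySem.List.enumerate giftorder).foldl
    (fun (st : Int × PySem.Dict Int Int) p =>
      let obs := if st.2.contains p.2 then st.2 else st.2.insert p.2 0
      (max st.1 (p.1 - obs.getD p.2 0 - 1), obs.insert p.2 p.1))
    (0, PySem.Dict.empty) with hs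
  set dB := (PySem.List.enumerate giftorder).foldl
    (fun (d : PySem.Dict Int (List Int)) p => d.modify p.2 [] (· ++ [p.1]))
    PySem.Dict.empty with hdB
  obtain ⟨h1, h2, h3, h4⟩ := hinv
  set n := PySem.List.len giftorder with hn
  -- A's second pass over the last-seen indices
  have hA : s.2.values.foldl (fun m v => max m (n - v - 1)) s.1
      = dB.items.foldl (fun m p => max m (n - pvLastD p.2 - 1))
          (dB.items.foldl (fun m p => pvInner m p.2) 0) := by
    simp only [PySem.Dict.values, h1, List.map_map, List.foldl_map, h4]
    rfl
  -- B's second pass, per gift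
  have hB : dB.values.foldl (fun best idxs =>
        let b1 := max best (PySem.List.pyGetD idxs 0 0 - 1)
        let b2 := (idxs.zip (PySem.List.slice idxs (some 1) none)).foldl
          (fun m q => max m (q.2 - q.1 - 1)) b1
        max b2 (n - PySem.List.pyGetD idxs (-1) 0 - 1)) 0
      = dB.items.foldl (fun m p => max (pvInner m p.2) (n - pvLastD p.2 - 1)) 0 := by
    simp only [PySem.Dict.values, List.foldl_map]
    refine PySem.List.foldl_congr_mem _ _ _ _ ?_
    intro acc p hp
    have hne : p.2 ≠ [] := h2 p hp
    show max _ (n - PySem.List.pyGetD p.2 (-1) 0 - 1) = _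
    rw [PySem.List.pyGetD_neg_one p.2 0 hne, pv_getLast_eq p.2 hne,
      PySem.List.slice_from_one]
    rfl
  rw [hA, hB, pv_interchange n dB.items 0]
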